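-- pv_equiv track=rewrite | github.com/seojpark91/HackerRank_dailycoding | toys.py | toys
-- ===== SOURCE A (Python) =====
-- def toys(w):
--     """
--     return the minimum number of containers required to ship
--
--     parameter:
--     w: an array of integers that represent the weights of each order to ship
--     """
--     n_container = 0
--     w = set(w)
--     while len(w) > 0:
--         min_weight = min(w)
--         n_container += 1
--         w = w.difference(set(range(min_weight, min_weight + 4 + 1)))
--
--     return n_container
-- ===== SOURCE B (Python) =====
-- def toys(w):
--     count = 0
--     bound = None
--     for x in sorted(set(w)):
--         if bound is None or x > bound:
--             count += 1
--             bound = x + 4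
--     return count
-- ===== Notes on version B (the rewrite author's own statement) =====
-- stated objective: faster
-- what changed: Replaced the repeated min-and-set-difference loop over a shrinking set with one sort of the distinct weights followed by a single greedy linear sweep keeping the current container's upper bound.
import Mathlib
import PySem

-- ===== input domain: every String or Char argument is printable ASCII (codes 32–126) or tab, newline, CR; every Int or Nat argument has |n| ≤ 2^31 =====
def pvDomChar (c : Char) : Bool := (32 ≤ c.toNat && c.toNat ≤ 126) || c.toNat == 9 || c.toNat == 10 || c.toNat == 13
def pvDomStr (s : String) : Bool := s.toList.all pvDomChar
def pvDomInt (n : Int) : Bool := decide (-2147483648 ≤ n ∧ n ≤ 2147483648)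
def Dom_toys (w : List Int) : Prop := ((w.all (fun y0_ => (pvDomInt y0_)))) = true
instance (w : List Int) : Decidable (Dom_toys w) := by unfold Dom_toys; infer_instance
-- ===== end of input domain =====

-- B replaces A's repeated min + set-difference loop by one sort of the distinct
-- weights and a single greedy sweep (objective: faster).

-- ===== PORT A =====
-- the 'while len(w) > 0' loop of A; terminates because the minimum is removed
def toysLoop (s : PySem.Set Int) (n : Int) : Int :=
  if 0 < s.length then
    match hm : PySem.List.min? s (fun x => x) with
    | none => n    -- unreachable: s is nonempty
    | some m =>
        toysLoop (PySem.Set.diff s (PySem.Set.ofList (PySem.List.pyRange m (m + 4 + 1) 1))) (n + 1)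
  else n
termination_by s.length
decreasing_by
  have hmem : m ∈ s := PySem.List.min?_mem hm
  have hr : m ∈ PySem.Set.ofList (PySem.List.pyRange m (m + 4 + 1) 1) := by
    rw [PySem.Set.mem_ofList, PySem.List.mem_pyRange_one]; omega
  simp only [PySem.Set.diff]
  exact List.length_filter_lt_length_iff_exists.mpr ⟨m, hmem, by simp [hr]⟩

def toys (w : List Int) : Int := toysLoop (PySem.Set.ofList w) 0

-- ===== PORT B =====
def toysAltStep (st : Int × Option Int) (x : Int) : Int × Option Int :=
  match st.2 with
  | none => (st.1 + 1, some (x + 4))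
  | some b => if b < x then (st.1 + 1, some (x + 4)) else st

def toys_alt (w : List Int) : Int :=
  ((PySem.List.sorted (PySem.Set.ofList w) (fun x => x) false).foldl toysAltStep (0, none)).1

-- ===== PRECONDITION & SPEC =====
def Spec_toys (w : List Int) (out : Int) : Prop := out = toys_alt w
instance (w : List Int) (out : Int) : Decidable (Spec_toys w out) := by unfold Spec_toys; infer_instance

-- ===== CLAIM (what is proved, stated in full; the proofs are below) =====
def Claim_equal_toys : Prop := ∀ (w : List Int), Dom_toys w → Spec_toys w (toys w)

-- ===== LEMMAS AND PROOFS =====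

-- abstract greedy count on a (sorted, strictly increasing) list of distinct weights
def greedy : List Int → Int
  | [] => 0
  | x :: xs => 1 + greedy (xs.filter (fun y => x + 4 < y))
termination_by l => l.length
decreasing_by
  simp only [List.length_unattach]
  exact Nat.lt_succ_of_le (by simpa using List.length_filter_le _ xs.attach)

lemma greedy_cons (x : Int) (xs : List Int) :
    greedy (x :: xs) = 1 + greedy (xs.filter (fun y => x + 4 < y)) := by
  rw [greedy]

lemma foldl_step_some (xs : List Int) (c b : Int) (hs : xs.Pairwise (· < ·)) :
    (xs.foldl toysAltStep (c, some b)).1 = c + greedy (xs.filter (fun y => b < y)) := by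
  induction xs generalizing c b with
  | nil => simp [greedy]
  | cons x t ih =>
    have ht : t.Pairwise (· < ·) := hs.tail
    have hlt : ∀ y ∈ t, x < y := (List.pairwise_cons.mp hs).1
    by_cases hbx : b < x
    · simp only [List.foldl_cons, toysAltStep, if_pos hbx]
      rw [ih _ _ ht]
      have hfix : t.filter (fun y => x + 4 < y) = (t.filter (fun y => b < y)).filter (fun y => x + 4 < y) := by
        rw [List.filter_filter]
        apply List.filter_congr
        intro y _
        by_cases h4 : x + 4 < y
        · simp [h4]; omega
        · simp [h4]
      rw [List.filter_cons_of_pos (by simpa using hbx), greedy_cons, ← hfix]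
      ring
    · simp only [List.foldl_cons, toysAltStep, if_neg hbx]
      rw [ih _ _ ht, List.filter_cons_of_neg (by simpa using hbx)]

lemma foldl_step_none (xs : List Int) (c : Int) (hs : xs.Pairwise (· < ·)) :
    (xs.foldl toysAltStep (c, none)).1 = c + greedy xs := by
  cases xs with
  | nil => simp [greedy]
  | cons x t =>
    simp only [List.foldl_cons, toysAltStep]
    rw [foldl_step_some t (c + 1) (x + 4) hs.tail, greedy_cons]
    ring

lemma toysLoop_eq : ∀ (k : Nat) (s : PySem.Set Int) (n : Int), s.length = k → s.Nodup →
    toysLoop s n = n + greedy (PySem.List.sorted s (fun x => x) false) := by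
  intro k
  induction k using Nat.strong_induction_on with
  | _ k ih =>
    intro s n hk hnd
    by_cases hlen : 0 < s.length
    · -- s nonempty: min? = some m
      obtain ⟨m, hm⟩ : ∃ m, PySem.List.min? s (fun x => x) = some m := by
        cases hmm : PySem.List.min? s (fun x => x) with
        | none =>
            have := (PySem.List.min?_eq_none_iff s (fun x => x)).mp hmm
            rw [this] at hlen; simp at hlen
        | some m => exact ⟨m, rfl⟩
      have hms : m ∈ s := PySem.List.min?_mem hm
      have hmin : ∀ y ∈ s, m ≤ y := fun y hy => PySem.List.min?_isMin hm y hy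
      -- the sorted list
      set L := PySem.List.sorted s (fun x => x) false with hL
      have hperm : L.Perm s := PySem.List.sorted_perm s _ _
      have hLnd : L.Nodup := hperm.nodup_iff.mpr hnd
      have hLle : L.Pairwise (· ≤ ·) := by
        simpa using PySem.List.sorted_pairwise s (fun x => x)
      have hLne : L.Pairwise (· ≠ ·) := hLnd
      have hLlt : L.Pairwise (· < ·) := by
        refine (hLle.and hLne).imp ?_
        rintro a b ⟨h1, h2⟩; exact lt_of_le_of_ne h1 h2
      obtain ⟨h0, t, hLc⟩ : ∃ h0 t, L = h0 :: t := by
        cases hLe : L with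
        | nil =>
            exfalso
            have := (PySem.List.sorted_eq_nil_iff s (fun x => x) false).mp (hL.symm.trans hLe)
            rw [this] at hlen; simp at hlen
        | cons a b => exact ⟨a, b, rfl⟩
      have hhead : h0 = m := by
        have h1 : ∀ y ∈ s, (fun x => x) h0 ≤ (fun x => x) y :=
          PySem.List.key_head_sorted_le s (fun x => x) (hL.symm.trans hLc)
        have h0s : h0 ∈ s := hperm.mem_iff.mp (hLc ▸ List.mem_cons_self ..)
        exact le_antisymm (h1 m hms) (hmin h0 h0s)
      subst hhead
      -- the next set
      set s' := PySem.Set.diff s (PySem.Set.ofList (PySem.List.pyRange h0 (h0 + 4 + 1) 1)) with hs'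
      have hsnd' : s'.Nodup := PySem.Set.nodup_diff s _ hnd
      have hmem' : ∀ y, y ∈ s' ↔ y ∈ t ∧ h0 + 4 < y := by
        intro y
        rw [hs', PySem.Set.mem_diff, PySem.Set.mem_ofList, PySem.List.mem_pyRange_one]
        constructor
        · rintro ⟨hy, hr⟩
          have hym : h0 ≤ y := hmin y hy
          have hyL : y ∈ h0 :: t := hLc ▸ hperm.mem_iff.mpr hy
          have h4 : h0 + 4 < y := by omega
          rcases List.mem_cons.mp hyL with rfl | hyt
          · omega
          · exact ⟨hyt, h4⟩
        · rintro ⟨hyt, h4⟩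
          refine ⟨hperm.mem_iff.mp (hLc ▸ List.mem_cons_of_mem _ hyt), by omega⟩
      have htlt : t.Pairwise (· < ·) := (hLc ▸ hLlt).tail
      have htnd : t.Nodup := by rw [hLc] at hLnd; exact hLnd.of_cons
      have hfnd : (t.filter (fun y => h0 + 4 < y)).Nodup := htnd.filter _
      have hfperm : (t.filter (fun y => h0 + 4 < y)).Perm s' := by
        rw [List.perm_ext_iff_of_nodup hfnd hsnd']
        intro y
        rw [hmem' y, List.mem_filter]
        simp
      have hsorted' : PySem.List.sorted s' (fun x => x) false = t.filter (fun y => h0 + 4 < y) :=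
        PySem.List.sorted_eq_of_perm_of_pairwise_lt s' _ (fun x => x) hfperm (by simpa using htlt.filter _)
      have hlt' : s'.length < k := by
        rw [← hk]
        have hr : h0 ∈ PySem.Set.ofList (PySem.List.pyRange h0 (h0 + 4 + 1) 1) := by
          rw [PySem.Set.mem_ofList, PySem.List.mem_pyRange_one]; omega
        simp only [hs', PySem.Set.diff]
        exact List.length_filter_lt_length_iff_exists.mpr ⟨h0, hms, by simp [hr]⟩
      have hrec := ih s'.length hlt' s' (n + 1) rfl hsnd'
      rw [toysLoop, if_pos hlen]
      -- reduce the dependent match on min?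
      have hstep : (match hmm : PySem.List.min? s (fun x => x) with
          | none => n
          | some m => toysLoop (PySem.Set.diff s (PySem.Set.ofList (PySem.List.pyRange m (m + 4 + 1) 1))) (n + 1)) =
          toysLoop s' (n + 1) := by
        rw [hs']
        split
        · simp_all
        · rename_i m' hm'
          rw [hm] at hm'
          cases hm'
          rfl
      rw [hstep, hrec, hsorted', hLc, greedy_cons]
      ring
    · -- s = []
      have hs0 : s = [] := List.length_eq_zero_iff.mp (by omega)
      rw [toysLoop, if_neg hlen, hs0]
      simp [greedy, PySem.List.sorted]
-- ===== VERDICT (by name: the statement is the Claim_ definition above) =====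
theorem toys_spec : Claim_equal_toys := by
  intro w _
  unfold Spec_toys toys toys_alt
  rw [toysLoop_eq (PySem.Set.ofList w).length _ 0 rfl (PySem.Set.nodup_ofList w),
      foldl_step_none _ _ (PySem.List.sorted_ofList_pairwise_lt w)]
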